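-- pv_equiv track=rewrite | github.com/idriskagan/Ornek | decimal to binary.py | toplama
-- ===== SOURCE A (Python) =====
-- def toplama ( a , b):
--     x = int(a+b)
--     dizi = []
--     while(x >0) :
--         if (x<2):
--             dizi.append(1)
--             x=0
--         else:
--             dizi.append(int(x%2))
--             x=int(x/2)
--     dizi.reverse()
--     return dizi
-- ===== SOURCE B (Python) =====
-- def toplama(a, b):
--     x = a + b
--     if x <= 0:
--         return []
--     return [int(c) for c in bin(x)[2:]]
-- ===== Notes on version B (the rewrite author's own statement) =====
-- stated objective: idiomatic
-- what changed: Replaces the manual mod-2/division loop with append and final reverse by the built-in bin() string conversion, slicing off the '0b' prefix and parsing each digit character (empty list for non-positive sums, where A's loop never runs).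
import Mathlib
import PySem

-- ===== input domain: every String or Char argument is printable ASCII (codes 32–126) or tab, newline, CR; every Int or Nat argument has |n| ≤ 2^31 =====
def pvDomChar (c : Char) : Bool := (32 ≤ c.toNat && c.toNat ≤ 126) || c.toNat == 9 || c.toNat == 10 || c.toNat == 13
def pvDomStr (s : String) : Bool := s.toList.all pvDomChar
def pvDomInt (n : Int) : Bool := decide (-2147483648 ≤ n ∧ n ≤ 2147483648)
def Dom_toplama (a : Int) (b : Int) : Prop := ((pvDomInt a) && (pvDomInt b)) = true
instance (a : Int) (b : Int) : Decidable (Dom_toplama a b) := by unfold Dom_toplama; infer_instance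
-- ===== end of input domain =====

-- B replaces A's manual mod-2/division loop plus final reverse by a built-in-style
-- most-significant-first binary conversion (bin(x)[2:]); objective: idiomatic.

-- ===== PORT A =====
-- A's while loop: collects bits LSB-first into dizi, then reverses.
-- int(x/2) truncates toward zero; since the loop only runs for x > 0 this equals
-- Lean's truncated Int division x / 2 exactly (and floats are exact on |x| ≤ 2^32).
def toplamaLoop (x : Int) (dizi : List Int) : List Int :=
  if h : x > 0 then
    if x < 2 then toplamaLoop 0 (dizi ++ [1])
    else toplamaLoop (x / 2) (dizi ++ [x % 2])
  else dizi
termination_by x.toNat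
decreasing_by
  · omega
  · have : x / 2 < x := by omega
    omega

def toplama (a : Int) (b : Int) : List Int :=
  (toplamaLoop (a + b) []).reverse

-- ===== PORT B =====
-- bin(x)[2:] as a digit list, most significant bit first (empty for 0).
def binDigits (n : Nat) : List Int :=
  if n = 0 then [] else binDigits (n / 2) ++ [(n % 2 : Int)]

def toplama_alt (a : Int) (b : Int) : List Int :=
  let x := a + b
  if x ≤ 0 then [] else binDigits x.toNat

-- ===== PRECONDITION & SPEC =====
def Spec_toplama (a : Int) (b : Int) (out : List Int) : Prop := out = toplama_alt a b
instance (a : Int) (b : Int) (out : List Int) : Decidable (Spec_toplama a b out) := by unfold Spec_toplama; infer_instance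

-- ===== CLAIM (what is proved, stated in full; the proofs are below) =====
def Claim_equal_toplama : Prop := ∀ (a : Int) (b : Int), Dom_toplama a b → Spec_toplama a b (toplama a b)

-- ===== LEMMAS AND PROOFS =====
theorem toplamaLoop_eq (n : Nat) : ∀ (x : Int) (dizi : List Int), x.toNat = n →
    toplamaLoop x dizi = dizi ++ (binDigits x.toNat).reverse := by
  induction n using Nat.strong_induction_on with
  | _ n ih =>
    intro x dizi hx
    rw [toplamaLoop]
    split
    · next hpos =>
      split
      · next hlt =>
        -- x = 1
        have hx1 : x = 1 := by omega
        subst hx1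
        rw [toplamaLoop]
        have hb : binDigits 1 = [1] := by rw [binDigits, binDigits]; norm_num
        norm_num [hb]
      · next hge =>
        have h2 : (2:Int) ≤ x := by omega
        have hdiv : (x / 2).toNat < n := by omega
        rw [ih _ hdiv (x / 2) _ rfl]
        have h1 : (x / 2).toNat = x.toNat / 2 := by omega
        have h2' : x % 2 = ((x.toNat % 2 : Nat) : Int) := by omega
        have h0 : x.toNat ≠ 0 := by omega
        rw [h1, h2']
        conv_rhs => rw [binDigits]
        simp [h0]
    · next hnp =>
      have : x.toNat = 0 := by omega
      rw [this, binDigits]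
      simp

-- ===== VERDICT (by name: the statement is the Claim_ definition above) =====
theorem toplama_spec : Claim_equal_toplama := by
  intro a b _
  unfold Spec_toplama toplama toplama_alt
  rw [toplamaLoop_eq (a + b).toNat (a + b) [] rfl]
  simp only [List.nil_append, List.reverse_reverse]
  split
  · next hle =>
    have : (a + b).toNat = 0 := by omega
    rw [this, binDigits]; simp
  · rfl
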